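-- pv_equiv track=rewrite | github.com/Alatius/latin-macronizer | latin_macronizer/scansion.py | separate_ambiguous_vowels
-- ===== SOURCE A (Python) =====
-- def separate_ambiguous_vowels(accenteds):
--     """
--     If a vowel is ambiguous (_^), generate separate accented forms, one for each possible combination.
--     Input: ['ba_^ce_^]
--     Output: ['bace', 'ba_ce', 'bace_', 'ba_ce_']
--     """
--     accented_modifications = {'nescio_': 'nescio_^',
--                               'u_ni_us': 'u_ni_^us',
--                               'illi_us': 'illi_^us',
--                               'ipsi_us': 'ipsi_^us',
--                               'alteri_us': 'alteri_^us'}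
--     new_accenteds = []
--     for accented in accenteds:
--         accented = accented_modifications.get(accented, accented)
--         parts = accented.split('_^')
--         for variant in range(1 << len(parts) - 1):
--             new_accented = []
--             for bit_pos, part in enumerate(parts):
--                 new_accented.append(part)
--                 if 1 << bit_pos & variant:
--                     new_accented.append('_')
--             new_accenteds.append(''.join(new_accented))
--     return new_accenteds
-- ===== SOURCE B (Python) =====
-- def separate_ambiguous_vowels(accenteds):
--     """Prefix-sharing doubling accumulator instead of per-variant bitmask reconstruction."""
--     accented_modifications = {'nescio_': 'nescio_^',
--                               'u_ni_us': 'u_ni_^us',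
--                               'illi_us': 'illi_^us',
--                               'ipsi_us': 'ipsi_^us',
--                               'alteri_us': 'alteri_^us'}
--     new_accenteds = []
--     for accented in accenteds:
--         accented = accented_modifications.get(accented, accented)
--         parts = accented.split('_^')
--         results = [parts[0]]
--         for part in parts[1:]:
--             results = [r + part for r in results] + [r + '_' + part for r in results]
--         new_accenteds.extend(results)
--     return new_accenteds
-- ===== Notes on version B (the rewrite author's own statement) =====
-- stated objective: simpler
-- what changed: Replaces the per-variant bitmask loop (rebuilding every variant from scratch over range(2**(len(parts)-1))) with a prefix-sharing doubling accumulator: one pass over the gaps, doubling the result list at each gap with the no-underscore half first, which matches the original binary-counting order.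
import Mathlib
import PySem

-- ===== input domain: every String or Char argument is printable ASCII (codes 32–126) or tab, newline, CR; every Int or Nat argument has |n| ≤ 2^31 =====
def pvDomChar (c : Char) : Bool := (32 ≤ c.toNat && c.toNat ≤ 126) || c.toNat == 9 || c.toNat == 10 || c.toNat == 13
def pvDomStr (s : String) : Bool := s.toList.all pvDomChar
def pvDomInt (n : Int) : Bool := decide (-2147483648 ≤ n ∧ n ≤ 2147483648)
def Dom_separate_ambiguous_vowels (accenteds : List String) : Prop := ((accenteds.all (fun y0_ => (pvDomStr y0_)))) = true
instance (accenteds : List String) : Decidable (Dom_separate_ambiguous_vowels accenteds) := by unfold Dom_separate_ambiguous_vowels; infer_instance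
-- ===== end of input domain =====

-- B replaces A's per-variant bitmask reconstruction with a prefix-sharing doubling
-- accumulator over the ambiguous gaps (no-underscore half first); same outputs.


-- ===== PORT A =====
-- the literal dict 'accented_modifications' of A
def pvModsA : PySem.Dict String String :=
  ((((PySem.Dict.empty.insert "nescio_" "nescio_^").insert "u_ni_us" "u_ni_^us").insert
      "illi_us" "illi_^us").insert "ipsi_us" "ipsi_^us").insert "alteri_us" "alteri_^us"

-- inner loop of A: ''.join(new_accented) accumulated over enumerate(parts)
-- (bit_pos ≥ 0 always, so '.toNat' on the enumerate index is exact)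
def pvVariantA (parts : List (List Char)) (variant : Int) : List Char :=
  PySem.Chars.join []
    ((PySem.List.enumerate parts 0).foldl
      (fun na bp =>
        let na2 := na ++ [bp.2]
        if PySem.Int.band ((1 : Int) <<< bp.1.toNat) variant ≠ 0 then na2 ++ [['_']] else na2)
      [])

def separate_ambiguous_vowels (accenteds : List String) : List String :=
  accenteds.foldl
    (fun new_accenteds accented =>
      let accented2 := pvModsA.getD accented accented
      let parts := PySem.Chars.splitOn accented2.toList ['_', '^']
      -- range(1 << len(parts) - 1); len(parts) ≥ 1 always, so the Nat subtraction is exact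
      (PySem.List.pyRange 0 ((1 <<< (parts.length - 1) : Nat) : Int) 1).foldl
        (fun acc variant => acc ++ [String.ofList (pvVariantA parts variant)]) new_accenteds)
    []

-- ===== PORT B =====
-- the literal dict 'accented_modifications' of B (same literal as in A's source)
def pvModsB : PySem.Dict String String :=
  ((((PySem.Dict.empty.insert "nescio_" "nescio_^").insert "u_ni_us" "u_ni_^us").insert
      "illi_us" "illi_^us").insert "ipsi_us" "ipsi_^us").insert "alteri_us" "alteri_^us"

-- doubling accumulator: results = [r+part for r in results] + [r+'_'+part for r in results]
-- (the [] branch is unreachable: str.split never returns an empty list)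
def pvBexpand (parts : List (List Char)) : List (List Char) :=
  match parts with
  | [] => []
  | p :: rest =>
    rest.foldl
      (fun results part =>
        results.map (fun r => r ++ part) ++ results.map (fun r => r ++ ['_'] ++ part))
      [p]

def separate_ambiguous_vowels_alt (accenteds : List String) : List String :=
  accenteds.foldl
    (fun new_accenteds accented =>
      let accented2 := pvModsB.getD accented accented
      let parts := PySem.Chars.splitOn accented2.toList ['_', '^']
      new_accenteds ++ (pvBexpand parts).map String.ofList)
    []

-- ===== PRECONDITION & SPEC =====
def Spec_separate_ambiguous_vowels (accenteds : List String) (out : List String) : Prop := out = separate_ambiguous_vowels_alt accenteds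
instance (accenteds : List String) (out : List String) : Decidable (Spec_separate_ambiguous_vowels accenteds out) := by unfold Spec_separate_ambiguous_vowels; infer_instance

-- ===== CLAIM (what is proved, stated in full; the proofs are below) =====
def Claim_equal_separate_ambiguous_vowels : Prop := ∀ (accenteds : List String), Dom_separate_ambiguous_vowels accenteds → Spec_separate_ambiguous_vowels accenteds (separate_ambiguous_vowels accenteds)

-- ===== LEMMAS AND PROOFS =====

-- str.split never returns the empty list
theorem pv_go_ne_nil (sep : List Char) : ∀ (fuel : Nat) (l cur : List Char) (acc : List (List Char)),
    PySem.Chars.splitOn.go sep fuel l cur acc ≠ [] := by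
  intro fuel
  induction fuel with
  | zero => intro l cur acc; simp [PySem.Chars.splitOn.go]
  | succ n ih =>
    intro l cur acc
    cases l with
    | nil => simp [PySem.Chars.splitOn.go]
    | cons c rest =>
      rw [PySem.Chars.splitOn.go]
      split_ifs with h
      · exact ih _ _ _
      · exact ih _ _ _

theorem pv_splitOn_ne_nil (cs sep : List Char) : PySem.Chars.splitOn cs sep ≠ [] :=
  pv_go_ne_nil sep _ _ _ _

-- the common mathematical row: underscore after element i iff bit i of the variant is set,
-- read off front-to-back by parity/halving (pvRows = the pieces, pvRow = their concatenation)
def pvRows : List (List Char) → Nat → List (List Char)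
  | [], _ => []
  | p :: rest, n => [p] ++ (if n % 2 = 1 then [['_']] else []) ++ pvRows rest (n / 2)

def pvRow : List (List Char) → Nat → List Char
  | [], _ => []
  | p :: rest, n => p ++ (if n % 2 = 1 then ['_'] else []) ++ pvRow rest (n / 2)

theorem pv_shift_cast (i : Nat) : ((1 : Int) <<< ((i : Int))) = (((1 <<< i : Nat) : Int)) := by
  rw [show ((1:Int) <<< ((i : Int))) = ((Nat.shiftLeft' false 1 i : Nat) : Int) from rfl,
     Nat.shiftLeft'_false]

theorem pv_bit_iff (i n : Nat) :
    (PySem.Int.band ((1 : Int) <<< ((i : Int))) ((n : Int)) ≠ 0) ↔ n.testBit i := by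
  rw [pv_shift_cast, PySem.Int.band_natCast, Nat.one_shiftLeft, Nat.and_comm, Nat.and_two_pow]
  cases h : n.testBit i <;> simp

-- A's inner foldl over enumerate(parts, s) produces exactly the pvRows pieces of n >>> s
theorem pv_fold_rows (n : Nat) : ∀ (l : List (List Char)) (s : Nat) (a : List (List Char)),
    (PySem.List.enumerate l ((s : Int))).foldl
      (fun na bp =>
        let na2 := na ++ [bp.2]
        if PySem.Int.band ((1 : Int) <<< bp.1.toNat) ((n : Int)) ≠ 0 then na2 ++ [['_']] else na2)
      a
    = a ++ pvRows l (n >>> s) := by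
  intro l
  induction l with
  | nil => intro s a; simp [PySem.List.enumerate, pvRows]
  | cons p t ih =>
    intro s a
    have hcast : ((s : Int)) + 1 = (((s + 1 : Nat) : Int)) := by push_cast; ring
    have hstep : PySem.List.enumerate (p :: t) ((s : Int))
        = ((s : Int), p) :: PySem.List.enumerate t (((s + 1 : Nat) : Int)) := by
      rw [← hcast]; rfl
    rw [hstep, List.foldl_cons, ih]
    simp only [Int.toNat_natCast]
    have hmod : ((n >>> s) % 2 = 1) ↔ n.testBit s := by simp [Nat.testBit]
    have hdiv : (n >>> s) / 2 = n >>> (s + 1) := by simp [Nat.shiftRight_succ]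
    by_cases hb : n.testBit s
    · rw [if_pos ((pv_bit_iff s n).mpr hb)]
      simp only [pvRows, if_pos (hmod.mpr hb), hdiv]
      simp
    · rw [if_neg (fun h => hb ((pv_bit_iff s n).mp h))]
      simp only [pvRows, if_neg (fun h => hb (hmod.mp h)), hdiv]
      simp

theorem pv_join0 (l : List (List Char)) : PySem.Chars.join [] l = l.flatten := by
  induction l with
  | nil => rfl
  | cons a t ih =>
    cases t with
    | nil => simp [PySem.Chars.join, List.intercalate]
    | cons b t' =>
      simp only [PySem.Chars.join, List.intercalate] at ih ⊢
      simp [List.intersperse] at ih ⊢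
      exact ih

theorem pv_flat (l : List (List Char)) : ∀ n, (pvRows l n).flatten = pvRow l n := by
  induction l with
  | nil => intro n; rfl
  | cons p t ih => intro n; simp only [pvRows, pvRow]; split_ifs <;> simp [ih]

theorem pv_variantA_eq_row (parts : List (List Char)) (n : Nat) :
    pvVariantA parts ((n : Int)) = pvRow parts n := by
  unfold pvVariantA
  have h := pv_fold_rows n parts 0 []
  simp only [Nat.cast_zero, Nat.shiftRight_zero] at h
  rw [h]
  simp [pv_join0, pv_flat]

-- appending a part with the new top bit clear: the row just gains the part
theorem pv_row_append0 (q : List Char) : ∀ (l : List (List Char)) (n : Nat),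
    l ≠ [] → n < 2 ^ (l.length - 1) → pvRow (l ++ [q]) n = pvRow l n ++ q := by
  intro l
  induction l with
  | nil => intro n h; exact absurd rfl h
  | cons x xs ih =>
    intro n _ hn
    cases xs with
    | nil =>
      have hn0 : n = 0 := by simp at hn; omega
      subst hn0
      simp [pvRow]
    | cons y ys =>
      have hlen : (x :: y :: ys).length - 1 = (y :: ys).length := rfl
      rw [hlen] at hn
      have h2 : n / 2 < 2 ^ ((y :: ys).length - 1) := by
        have e2 : 2 ^ (y :: ys).length = 2 * 2 ^ ((y :: ys).length - 1) := by
          conv_lhs => rw [show (y :: ys).length = ((y :: ys).length - 1) + 1 from rfl]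
          rw [pow_succ]; ring
        rw [e2] at hn; omega
      rw [show (x :: y :: ys) ++ [q] = x :: ((y :: ys) ++ [q]) from rfl]
      simp only [pvRow]
      rw [ih (n / 2) (by simp) h2]
      simp [pvRow]

-- appending a part with the new top bit set: the row gains '_' then the part
theorem pv_row_append1 (q : List Char) : ∀ (l : List (List Char)) (n : Nat),
    l ≠ [] → n < 2 ^ (l.length - 1) →
    pvRow (l ++ [q]) (n + 2 ^ (l.length - 1)) = pvRow l n ++ '_' :: q := by
  intro l
  induction l with
  | nil => intro n h; exact absurd rfl h
  | cons x xs ih =>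
    intro n _ hn
    cases xs with
    | nil =>
      have hn0 : n = 0 := by simp at hn; omega
      subst hn0
      simp [pvRow]
    | cons y ys =>
      have hlen : (x :: y :: ys).length - 1 = (y :: ys).length := rfl
      rw [hlen] at hn ⊢
      have hm : (y :: ys).length = ((y :: ys).length - 1) + 1 := rfl
      have e2 : 2 ^ (y :: ys).length = 2 * 2 ^ ((y :: ys).length - 1) := by
        conv_lhs => rw [hm]
        rw [pow_succ]; ring
      have hmod : (n + 2 ^ (y :: ys).length) % 2 = n % 2 := by
        rw [e2]; omega
      have hdiv : (n + 2 ^ (y :: ys).length) / 2 = n / 2 + 2 ^ ((y :: ys).length - 1) := by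
        rw [e2]; omega
      have h2 : n / 2 < 2 ^ ((y :: ys).length - 1) := by
        rw [e2] at hn; omega
      rw [show (x :: y :: ys) ++ [q] = x :: ((y :: ys) ++ [q]) from rfl]
      simp only [pvRow, hmod, hdiv]
      rw [ih (n / 2) (by simp) h2]
      simp [pvRow]

-- the binary-counting rows ARE the doubling accumulator
theorem pv_map_row_eq_bexpand (p : List Char) (rest : List (List Char)) :
    (List.range (2 ^ rest.length)).map (pvRow (p :: rest)) = pvBexpand (p :: rest) := by
  induction rest using List.reverseRecOn with
  | nil => simp [pvRow, pvBexpand]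
  | append_singleton rest' q ih =>
    have hlen : (rest' ++ [q]).length = rest'.length + 1 := by simp
    rw [hlen, pow_succ, mul_two, List.range_add]
    rw [List.map_append, List.map_map]
    have hfst : (List.range (2 ^ rest'.length)).map (pvRow (p :: (rest' ++ [q])))
        = ((List.range (2 ^ rest'.length)).map (pvRow (p :: rest'))).map (fun r => r ++ q) := by
      rw [List.map_map]
      apply List.map_congr_left
      intro n hn
      have hn' : n < 2 ^ ((p :: rest').length - 1) := by
        simpa using List.mem_range.mp hn
      have := pv_row_append0 q (p :: rest') n (by simp) hn'
      simpa using this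
    have hsnd : (List.range (2 ^ rest'.length)).map ((pvRow (p :: (rest' ++ [q]))) ∘ (fun x => 2 ^ rest'.length + x))
        = ((List.range (2 ^ rest'.length)).map (pvRow (p :: rest'))).map (fun r => r ++ ['_'] ++ q) := by
      rw [List.map_map]
      apply List.map_congr_left
      intro n hn
      have hn' : n < 2 ^ ((p :: rest').length - 1) := by
        simpa using List.mem_range.mp hn
      have h1 := pv_row_append1 q (p :: rest') n (by simp) hn'
      simp only [Function.comp_apply]
      rw [Nat.add_comm (2 ^ rest'.length) n]
      have hl2 : (p :: rest').length - 1 = rest'.length := rfl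
      rw [hl2] at h1
      rw [show p :: (rest' ++ [q]) = (p :: rest') ++ [q] from rfl, h1]
      simp
    rw [hfst, hsnd, ih]
    show _ = pvBexpand (p :: (rest' ++ [q]))
    simp only [pvBexpand, List.foldl_append, List.foldl_cons, List.foldl_nil]

-- per-word variant lists agree
theorem pv_word (parts : List (List Char)) (hp : parts ≠ []) :
    (PySem.List.pyRange 0 ((1 <<< (parts.length - 1) : Nat) : Int) 1).map
        (fun v => String.ofList (pvVariantA parts v))
      = (pvBexpand parts).map String.ofList := by
  cases parts with
  | nil => exact absurd rfl hp
  | cons p rest =>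
    rw [PySem.List.pyRange_zero_natCast, List.map_map]
    have : ((fun v => String.ofList (pvVariantA (p :: rest) v)) ∘ (fun k : Nat => ((k : Int))))
        = fun k : Nat => String.ofList (pvRow (p :: rest) k) := by
      funext k
      simp [Function.comp, pv_variantA_eq_row]
    rw [this]
    have hlen : (p :: rest).length - 1 = rest.length := rfl
    rw [hlen, Nat.one_shiftLeft]
    rw [show (fun k : Nat => String.ofList (pvRow (p :: rest) k))
        = String.ofList ∘ pvRow (p :: rest) from rfl, ← List.map_map]
    rw [pv_map_row_eq_bexpand]

-- both outer loops produce the same list from any accumulator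
theorem pv_fold_words : ∀ (l : List String) (init : List String),
    l.foldl
      (fun new_accenteds accented =>
        let accented2 := pvModsA.getD accented accented
        let parts := PySem.Chars.splitOn accented2.toList ['_', '^']
        (PySem.List.pyRange 0 ((1 <<< (parts.length - 1) : Nat) : Int) 1).foldl
          (fun acc variant => acc ++ [String.ofList (pvVariantA parts variant)]) new_accenteds)
      init
    = l.foldl
      (fun new_accenteds accented =>
        let accented2 := pvModsB.getD accented accented
        let parts := PySem.Chars.splitOn accented2.toList ['_', '^']
        new_accenteds ++ (pvBexpand parts).map String.ofList)
      init := by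
  intro l
  induction l with
  | nil => intro init; rfl
  | cons x t ih =>
    intro init
    rw [List.foldl_cons, List.foldl_cons, ih]
    congr 1
    show (PySem.List.pyRange 0 _ 1).foldl _ init = _
    rw [PySem.List.foldl_append_singleton_eq_map]
    rw [show pvModsA = pvModsB from rfl]
    exact congrArg (init ++ ·)
      (pv_word _ (pv_splitOn_ne_nil (pvModsB.getD x x).toList ['_', '^']))

-- ===== VERDICT (by name: the statement is the Claim_ definition above) =====
theorem separate_ambiguous_vowels_spec : Claim_equal_separate_ambiguous_vowels := by
  intro accenteds _
  unfold Spec_separate_ambiguous_vowels separate_ambiguous_vowels separate_ambiguous_vowels_alt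
  exact pv_fold_words accenteds []
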